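-- pv_equiv track=rewrite | github.com/Joweldiakite/projetmath | Site1/polls/analyse/DDNG.py | TableData
-- ===== SOURCE A (Python) =====
-- def TableData(data):
--     Y = sorted(data)    # Rangement des donnees de data dans le tableau Y
--     modalites = []      # initialisation du tableau Modalites
--     effectifs = []      # initialisation du tableau effectifs
--
--     modalites.append(Y[0])      # on met le premier element de Y dans la premiere case du tableau modalites
--     effectifs.append(1)         # on met 1 dans la premiere case du tableau effectifs
--     k = 0
--
--     for i in range(1,len(Y)):     # pour i = 1 à longueur Y, on fait
--         if Y[i-1]==Y[i]:          # si l'element actuel est egal à lelement precedent de Y, on incremente effectifs de 1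
--             effectifs[k]=effectifs[k]+1
--         else :       # sinon on incremente d'abord k on range le nouvel element dans la case suivante du
--             k=k+1
--             modalites.append(Y[i])
--             effectifs.append(1)
--
--     return modalites, effectifs
-- ===== SOURCE B (Python) =====
-- def TableData(data):
--     counts = {}
--     for x in data:
--         counts[x] = counts.get(x, 0) + 1
--     modalites = sorted(counts)
--     effectifs = [counts[m] for m in modalites]
--     return modalites, effectifs
-- ===== Notes on version B (the rewrite author's own statement) =====
-- stated objective: idiomatic
-- what changed: Replaces A's sort-then-run-length index scan with a one-pass frequency dict followed by a sorted read of its keys.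
import Mathlib
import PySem

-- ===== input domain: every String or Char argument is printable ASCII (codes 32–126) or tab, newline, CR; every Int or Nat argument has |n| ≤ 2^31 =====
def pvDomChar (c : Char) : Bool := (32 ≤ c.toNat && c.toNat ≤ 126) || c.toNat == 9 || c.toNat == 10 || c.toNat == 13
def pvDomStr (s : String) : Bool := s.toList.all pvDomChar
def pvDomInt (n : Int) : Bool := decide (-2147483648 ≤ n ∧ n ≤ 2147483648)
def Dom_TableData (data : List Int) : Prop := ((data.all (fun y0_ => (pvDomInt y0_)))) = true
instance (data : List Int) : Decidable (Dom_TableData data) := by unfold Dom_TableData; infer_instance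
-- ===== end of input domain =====

-- B replaces A's sort-then-run-length index scan with a one-pass frequency dict read off in sorted key order;
-- equal return values are proved for nonempty data (A raises IndexError on empty data).

-- ===== PORT A =====
-- A: Y = sorted(data); modalites and effectifs start from the first sorted element; then a run-length scan over i in range(1, len(Y)).
-- The loop's indices i and i-1 are always in range, so Y[i] is ported as pyGetD (exact there).
def tdStep (Y : List Int) (st : List Int × List Int × Nat) (i : Int) : List Int × List Int × Nat :=
  if PySem.List.pyGetD Y (i - 1) 0 == PySem.List.pyGetD Y i 0 then
    (st.1, st.2.1.set st.2.2 (st.2.1.getD st.2.2 0 + 1), st.2.2)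
  else
    (st.1 ++ [PySem.List.pyGetD Y i 0], st.2.1 ++ [(1 : Int)], st.2.2 + 1)

def tdLoop (Y : List Int) (y0 : Int) : List Int × List Int × Nat :=
  (PySem.List.pyRange 1 (PySem.List.len Y) 1).foldl (tdStep Y) ([y0], [(1 : Int)], (0 : Nat))

def TableData (data : List Int) : List Int × List Int :=
  match PySem.List.sorted data (fun x => x) false with
  | [] => ([], [])      -- Python raises IndexError here (first-element access); excluded by Pre_TableData
  | y0 :: t => ((tdLoop (y0 :: t) y0).1, (tdLoop (y0 :: t) y0).2.1)

-- ===== PORT B =====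
-- B: counts = {}; for x in data: counts[x] = counts.get(x, 0) + 1; modalites = sorted(counts);
--    effectifs = [counts[m] for m in modalites]
def tdCounter (data : List Int) : PySem.Dict Int Int :=
  data.foldl (fun d x => d.insert x (d.getD x 0 + 1)) PySem.Dict.empty

def tdModalites (data : List Int) : List Int :=
  PySem.List.sorted (tdCounter data).keys (fun x => x) false

def TableData_alt (data : List Int) : List Int × List Int :=
  (tdModalites data, (tdModalites data).map (fun m => (tdCounter data).getD m 0))

-- ===== PRECONDITION & SPEC =====
-- A unconditionally indexes the first element of Y, so it raises IndexError on empty data: Pre_ excludes exactly the empty list.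
def Pre_TableData (data : List Int) : Prop := data ≠ []
instance (data : List Int) : Decidable (Pre_TableData data) := by unfold Pre_TableData; infer_instance
def pvWitness_TableData : List Int := [3, 1, 3, 2]

def Spec_TableData (data : List Int) (out : List Int × List Int) : Prop := out = TableData_alt data
instance (data : List Int) (out : List Int × List Int) : Decidable (Spec_TableData data out) := by unfold Spec_TableData; infer_instance

-- ===== CLAIM (what is proved, stated in full; the proofs are below) =====
def Claim_equal_TableData : Prop := ∀ (data : List Int), Dom_TableData data → Pre_TableData data → Spec_TableData data (TableData data)

-- ===== LEMMAS AND PROOFS =====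

-- the run-length scan as a recursion: given the previous element, the current run count and the rest
def runs (prev : Int) (c : Int) : List Int → List Int × List Int
  | [] => ([prev], [c])
  | b :: t => if prev = b then runs prev (c + 1) t
              else (prev :: (runs b 1 t).1, c :: (runs b 1 t).2)

-- a fold over adjacent pairs of a list
def adjFold {σ : Type} (g : σ → Int → Int → σ) : List Int → σ → σ
  | a :: b :: t, init => adjFold g (b :: t) (g init a b)
  | _, init => init

-- A's loop body, with the two indexed reads abstracted
def stepA : (List Int × List Int × Nat) → Int → Int → (List Int × List Int × Nat) :=
  fun st a b =>
    if a == b then (st.1, st.2.1.set st.2.2 (st.2.1.getD st.2.2 0 + 1), st.2.2)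
    else (st.1 ++ [b], st.2.1 ++ [(1 : Int)], st.2.2 + 1)

lemma adjFold_short {σ : Type} (g : σ → Int → Int → σ) (l : List Int) (init : σ)
    (h : l.length ≤ 1) : adjFold g l init = init := by
  match l with
  | [] => rfl
  | [a] => rfl
  | a :: b :: t => simp at h

-- an index loop 'for i in range(n+1, len(Y)): f(Y[i-1], Y[i])' is a fold over adjacent pairs of Y.drop n
lemma pyr_adj {σ : Type} (g : σ → Int → Int → σ) (Y : List Int) :
    ∀ (k n : Nat), Y.length - n ≤ k → ∀ (init : σ),
    (PySem.List.pyRange ((n : Int) + 1) ((Y.length : Int)) 1).foldl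
      (fun st i => g st (PySem.List.pyGetD Y (i - 1) 0) (PySem.List.pyGetD Y i 0)) init
    = adjFold g (Y.drop n) init := by
  intro k
  induction k with
  | zero =>
    intro n hk init
    rw [PySem.List.pyRange_one_eq_nil (by omega), List.foldl_nil,
      adjFold_short _ _ _ (by simp; omega)]
  | succ k ih =>
    intro n hk init
    by_cases hlt : n + 1 < Y.length
    · rw [PySem.List.pyRange_one_cons (by omega), List.foldl_cons]
      have h1 : ((n : Int) + 1) - 1 = (n : Int) := by omega
      have h2 : ((n : Int) + 1) = ((n + 1 : Nat) : Int) := by omega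
      rw [h1, h2, PySem.List.pyGetD_ofNat Y n 0 (by omega),
        PySem.List.pyGetD_ofNat Y (n + 1) 0 (by omega)]
      rw [ih (n + 1) (by omega)]
      have hd1 : Y.drop n = Y[n] :: Y.drop (n + 1) := (List.getElem_cons_drop (by omega)).symm
      have hd2 : Y.drop (n + 1) = Y[n + 1] :: Y.drop (n + 2) := (List.getElem_cons_drop (by omega)).symm
      conv_rhs => rw [hd1, hd2, adjFold, ← hd2]
    · rw [PySem.List.pyRange_one_eq_nil (by omega), List.foldl_nil,
        adjFold_short _ _ _ (by simp; omega)]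

lemma adj_runs : ∀ (t : List Int) (prev c : Int) (m e : List Int),
    adjFold stepA (prev :: t) (m ++ [prev], e ++ [c], e.length)
    = (m ++ (runs prev c t).1, e ++ (runs prev c t).2, e.length + (runs prev c t).2.length - 1) := by
  intro t
  induction t with
  | nil => intro prev c m e; simp [adjFold, runs]
  | cons b t' ih =>
    intro prev c m e
    rw [adjFold]
    by_cases h : prev = b
    · subst h
      have hset : (e ++ [c]).set e.length ((e ++ [c]).getD e.length 0 + 1) = e ++ [c + 1] := by
        simp [List.getD_eq_getElem?_getD]
      simp only [stepA, BEq.rfl, if_true, hset]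
      rw [ih prev (c + 1) m e]
      simp [runs]
    · have hbeq : (prev == b) = false := by simpa using h
      simp only [stepA, hbeq, Bool.false_eq_true, if_false]
      have hlen : e.length + 1 = (e ++ [c]).length := by simp
      rw [hlen, ih b 1 (m ++ [prev]) (e ++ [c])]
      conv_rhs => rw [runs, if_neg h, List.append_cons m prev, List.append_cons e c]
      refine Prod.ext rfl (Prod.ext rfl ?_)
      simp only [List.length_append, List.length_cons, List.length_nil]
      omega

-- facts about PySem.Set.ofList needed below
lemma foldl_add_prefix (l : List Int) : ∀ (s : List Int), ∃ u, l.foldl PySem.Set.add s = s ++ u := by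
  induction l with
  | nil => intro s; exact ⟨[], by simp⟩
  | cons y l ih =>
    intro s
    rw [List.foldl_cons, PySem.Set.add_eq_ite]
    by_cases h : y ∈ s
    · simpa [h] using ih s
    · obtain ⟨u, hu⟩ := ih (s ++ [y])
      exact ⟨y :: u, by simp [h, hu]⟩

lemma ofList_cons_eq (x : Int) (l : List Int) :
    PySem.Set.ofList (x :: l) = x :: (PySem.Set.ofList (x :: l)).tail := by
  rw [PySem.Set.ofList_eq_foldl, List.foldl_cons]
  have h0 : PySem.Set.add ([] : List Int) x = [x] := by
    rw [PySem.Set.add_eq_ite]; simp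
  rw [h0]
  obtain ⟨u, hu⟩ := foldl_add_prefix l [x]
  rw [hu]; rfl

lemma ofList_cons_dup (x : Int) (l : List Int) :
    PySem.Set.ofList (x :: x :: l) = PySem.Set.ofList (x :: l) := by
  rw [PySem.Set.ofList_eq_foldl, PySem.Set.ofList_eq_foldl, List.foldl_cons, List.foldl_cons,
    List.foldl_cons]
  have h0 : PySem.Set.add ([] : List Int) x = [x] := by rw [PySem.Set.add_eq_ite]; simp
  have h1 : PySem.Set.add [x] x = [x] := by rw [PySem.Set.add_eq_ite]; simp
  rw [h0, h1]

lemma foldl_add_cons_not_mem (l : List Int) : ∀ (x : Int) (s : List Int), x ∉ l →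
    l.foldl PySem.Set.add (x :: s) = x :: l.foldl PySem.Set.add s := by
  induction l with
  | nil => intro x s _; rfl
  | cons y l ih =>
    intro x s hx
    have hxy : y ≠ x := by rintro rfl; exact hx (by simp)
    rw [List.foldl_cons, List.foldl_cons]
    have hstep : PySem.Set.add (x :: s) y = x :: PySem.Set.add s y := by
      rw [PySem.Set.add_eq_ite, PySem.Set.add_eq_ite]
      by_cases h : y ∈ s
      · simp [h, hxy]
      · simp [h, hxy]
    rw [hstep, ih x (PySem.Set.add s y) (fun h => hx (by simp [h]))]

lemma ofList_cons_not_mem (x : Int) (l : List Int) (h : x ∉ l) :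
    PySem.Set.ofList (x :: l) = x :: PySem.Set.ofList l := by
  rw [PySem.Set.ofList_eq_foldl, PySem.Set.ofList_eq_foldl, List.foldl_cons]
  have h0 : PySem.Set.add ([] : List Int) x = [x] := by rw [PySem.Set.add_eq_ite]; simp
  rw [h0]
  exact foldl_add_cons_not_mem l x [] h

lemma foldl_add_sublist (l : List Int) : ∀ (s : List Int), (l.foldl PySem.Set.add s).Sublist (s ++ l) := by
  induction l with
  | nil => intro s; simp
  | cons y l ih =>
    intro s
    rw [List.foldl_cons, PySem.Set.add_eq_ite]
    by_cases h : y ∈ s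
    · simp only [h, if_true]
      exact (ih s).trans (by simp)
    · simp only [h, if_false]
      exact (ih (s ++ [y])).trans (by simp)

lemma ofList_sublist (l : List Int) : (PySem.Set.ofList l).Sublist l := by
  rw [PySem.Set.ofList_eq_foldl]
  simpa using foldl_add_sublist l []

lemma ofList_tail_ne_head (x : Int) (l : List Int) :
    ∀ v ∈ (PySem.Set.ofList (x :: l)).tail, v ≠ x := by
  intro v hv
  have hnd := PySem.Set.nodup_ofList (x :: l)
  rw [ofList_cons_eq x l] at hnd
  rintro rfl
  exact (List.nodup_cons.mp hnd).1 hv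

-- the run-length scan of a weakly increasing list is (distinct elements, their counts)
lemma runs_sorted : ∀ (t : List Int) (prev c : Int), (prev :: t).Pairwise (· ≤ ·) →
    runs prev c t = (PySem.Set.ofList (prev :: t),
      (c + (t.count prev : Int)) :: (PySem.Set.ofList (prev :: t)).tail.map (fun v => (t.count v : Int))) := by
  intro t
  induction t with
  | nil =>
    intro prev c _
    simp [runs]
    rw [PySem.Set.ofList_eq_foldl, List.foldl_cons]
    rw [show PySem.Set.add ([] : List Int) prev = [prev] by rw [PySem.Set.add_eq_ite]; simp]
    exact ⟨rfl, rfl⟩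
  | cons b t' ih =>
    intro prev c hp
    by_cases h : prev = b
    · subst h
      have hp' : (prev :: t').Pairwise (· ≤ ·) :=
        hp.sublist (List.cons_sublist_cons.mpr (List.sublist_cons_self _ _))
      rw [runs, if_pos rfl, ih prev (c + 1) hp', ofList_cons_dup]
      have hmap : ((PySem.Set.ofList (prev :: t')).tail).map (fun v => (((prev :: t').count v : Int)))
          = ((PySem.Set.ofList (prev :: t')).tail).map (fun v => ((t'.count v : Int))) :=
        List.map_congr_left (fun v hv => by
          have hne := Ne.symm (ofList_tail_ne_head prev t' v hv)
          simp [hne])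
      rw [hmap, show c + (((prev :: t').count prev : Int)) = c + 1 + ((t'.count prev : Int)) by
        simp only [List.count_cons_self]; push_cast; ring]
    · have hle : ∀ y ∈ b :: t', prev ≤ y := (List.pairwise_cons.mp hp).1
      have hble : ∀ y ∈ t', b ≤ y := (List.pairwise_cons.mp (List.pairwise_cons.mp hp).2).1
      have hnm : prev ∉ b :: t' := by
        intro hm
        rcases List.mem_cons.mp hm with rfl | hm'
        · exact h rfl
        · exact h (le_antisymm (hle b (by simp)) (hble prev hm'))
      rw [runs, if_neg h, ih b 1 (List.pairwise_cons.mp hp).2,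
        ofList_cons_not_mem prev (b :: t') hnm]
      refine Prod.ext rfl ?_
      simp only [List.tail_cons]
      congr 1
      · simp [List.count_eq_zero.mpr hnm]
      · conv_rhs => rw [ofList_cons_eq b t', List.map_cons]
        congr 1
        · simp only [List.count_cons_self]
          push_cast
          ring
        · apply List.map_congr_left
          intro v hv
          have hne := Ne.symm (ofList_tail_ne_head b t' v hv)
          simp [hne]

-- both sides equal (sorted(set(data)), counts looked up in data)
lemma A_char (data : List Int) (h : data ≠ []) :
    TableData data = (PySem.List.sorted (PySem.Set.ofList data) (fun x => x) false,
      (PySem.List.sorted (PySem.Set.ofList data) (fun x => x) false).map (fun v => (data.count v : Int))) := by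
  rcases hs : PySem.List.sorted data (fun x => x) false with _ | ⟨y0, t⟩
  · exact absurd ((PySem.List.sorted_eq_nil_iff data _ false).mp hs) h
  · have hpair : (y0 :: t).Pairwise (· ≤ ·) := by
      have := PySem.List.sorted_pairwise data (fun x => x)
      rwa [hs] at this
    -- the loop computes runs
    have h1 : tdLoop (y0 :: t) y0 = adjFold stepA (y0 :: t) ([y0], [(1 : Int)], (0 : Nat)) := by
      unfold tdLoop
      have hfold := pyr_adj stepA (y0 :: t) (y0 :: t).length 0 (by omega)
        (([y0], [(1 : Int)], (0 : Nat)) : List Int × List Int × Nat)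
      simp only [Nat.cast_zero, zero_add, List.drop_zero] at hfold
      rw [PySem.List.len_eq]
      exact hfold
    have h2 := adj_runs t y0 1 [] []
    simp only [List.nil_append, List.length_nil] at h2
    have hTD : TableData data = ((runs y0 1 t).1, (runs y0 1 t).2) := by
      unfold TableData
      rw [hs]
      show ((tdLoop (y0 :: t) y0).1, (tdLoop (y0 :: t) y0).2.1) = _
      rw [h1, h2]
    -- sorted(set(data)) is the deduplication of the sorted data
    have hM : PySem.List.sorted (PySem.Set.ofList data) (fun x => x) false
        = PySem.Set.ofList (y0 :: t) := by
      apply PySem.List.sorted_eq_of_perm_of_pairwise_lt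
      · apply (List.perm_ext_iff_of_nodup (PySem.Set.nodup_ofList _) (PySem.Set.nodup_ofList _)).mpr
        intro a
        simp only [PySem.Set.mem_ofList]
        rw [← hs]
        simp [PySem.List.mem_sorted]
      · have hsub := (hpair.sublist (ofList_sublist (y0 :: t))).and
          (PySem.Set.nodup_ofList (y0 :: t))
        exact hsub.imp (fun hx => lt_of_le_of_ne hx.1 hx.2)
    have hcnt : ∀ v : Int, data.count v = (y0 :: t).count v := by
      intro v
      have hperm : (y0 :: t).Perm data := by rw [← hs]; exact PySem.List.sorted_perm data _ false
      exact (hperm.count_eq v).symm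
    have hmap2 : (PySem.Set.ofList (y0 :: t)).map (fun v => ((data.count v : Int)))
        = (1 + (t.count y0 : Int)) :: ((PySem.Set.ofList (y0 :: t)).tail).map (fun v => ((t.count v : Int))) := by
      conv_lhs => rw [ofList_cons_eq y0 t]
      rw [List.map_cons]
      congr 1
      · rw [hcnt y0]
        simp only [List.count_cons_self]
        push_cast
        ring
      · apply List.map_congr_left
        intro v hv
        have hne := Ne.symm (ofList_tail_ne_head y0 t v hv)
        rw [hcnt v]
        simp [hne]
    rw [hTD, runs_sorted t y0 1 hpair, hM, hmap2]

lemma B_char (data : List Int) :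
    TableData_alt data = (PySem.List.sorted (PySem.Set.ofList data) (fun x => x) false,
      (PySem.List.sorted (PySem.Set.ofList data) (fun x => x) false).map (fun v => (data.count v : Int))) := by
  unfold TableData_alt tdModalites tdCounter
  rw [PySem.Dict.foldl_insert_getD_add_one_eq_counter, PySem.Dict.keys_counter]
  simp only [PySem.Dict.getD_counter]

-- ===== VERDICT (by name: the statement is the Claim_ definition above) =====
theorem TableData_spec : Claim_equal_TableData := by
  intro data _ hpre
  unfold Spec_TableData
  rw [A_char data hpre, B_char data]
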